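-- pv_equiv track=rewrite | github.com/Hin1209/SWJUNGLE_ALGORITHM | week02/2504괄호의값.py | calculate_ps
-- ===== SOURCE A (Python) =====
-- def calculate_ps(ps_list):
--     stack = []
--     res = 0
--     for i in range(len(ps_list)):
--         if ps_list[i] == '(':
--             stack.append('(')
--         elif ps_list[i] == '[':
--             stack.append('[')
--         elif ps_list[i] == ')':
--             if len(stack) == 0:
--                 return 0
--             score = 0
--             while len(stack) > 0 and stack[-1] != '(':
--                 if stack[-1] == '[': return 0
--                 score += stack[-1]
--                 stack.pop()
--             if len(stack) > 0:
--                 if score: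
--                     stack.pop()
--                     stack.append(2 * score)
--                 else:
--                     stack.pop()
--                     stack.append(2)
--             else:
--                 return 0
--         elif ps_list[i] == ']':
--             if len(stack) == 0:
--                 return 0
--             score = 0
--             while len(stack) > 0 and stack[-1] != '[':
--                 if stack[-1] == '(': return 0
--                 score += stack[-1]
--                 stack.pop()
--             if len(stack) > 0:
--                 if score:
--                     stack.pop()
--                     stack.append(3 * score)
--                 else:
--                     stack.pop()
--                     stack.append(3)
--             else:
--                 return 0
--     while stack:
--         tmp = stack.pop()
--         if tmp == '[' or tmp == ']' or tmp == '(' or tmp == ')':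
--             return 0
--         else:
--             res += tmp
--     return res
-- ===== SOURCE B (Python) =====
-- def calculate_ps(ps_list):
--     ans = 0
--     temp = 1
--     stack = []  # entries: [open_char, has_inner_value]
--     for ch in ps_list:
--         if ch == '(':
--             temp *= 2
--             stack.append(['(', False])
--         elif ch == '[':
--             temp *= 3
--             stack.append(['[', False])
--         elif ch == ')':
--             if not stack or stack[-1][0] != '(':
--                 return 0
--             if not stack[-1][1]:
--                 ans += temp
--             stack.pop()
--             temp //= 2
--             if stack:
--                 stack[-1][1] = True
--         elif ch == ']':
--             if not stack or stack[-1][0] != '[':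
--                 return 0
--             if not stack[-1][1]:
--                 ans += temp
--             stack.pop()
--             temp //= 3
--             if stack:
--                 stack[-1][1] = True
--     return 0 if stack else ans
-- ===== Notes on version B (the rewrite author's own statement) =====
-- stated objective: alternative
-- what changed: Replaces A's mixed value stack with collapse-while-loops on every close by a single linear pass that keeps only open brackets (with an inner-value flag) on the stack and maintains a running nesting multiplier, adding the multiplier to the answer at each leaf pair.
import Mathlib
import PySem

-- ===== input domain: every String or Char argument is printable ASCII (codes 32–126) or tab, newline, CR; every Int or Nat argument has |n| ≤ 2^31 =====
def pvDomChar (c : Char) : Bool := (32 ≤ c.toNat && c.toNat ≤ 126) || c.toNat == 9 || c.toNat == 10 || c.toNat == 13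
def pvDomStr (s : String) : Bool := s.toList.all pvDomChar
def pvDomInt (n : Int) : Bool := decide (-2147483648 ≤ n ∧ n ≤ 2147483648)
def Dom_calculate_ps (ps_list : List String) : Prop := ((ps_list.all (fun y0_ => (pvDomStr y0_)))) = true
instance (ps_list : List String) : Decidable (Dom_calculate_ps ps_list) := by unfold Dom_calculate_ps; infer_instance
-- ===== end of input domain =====

-- B is an alternative single-pass algorithm: only open brackets (with an inner-value flag) on
-- the stack and a running nesting multiplier, instead of A's mixed value stack with
-- collapse-while-loops; return values proved identical on all inputs (A and B are total).

-- ===== PORT A =====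
-- A's stack holds the chars '(' / '[' and intermediate integer scores.
inductive PItem : Type
  | lp : PItem
  | lb : PItem
  | num : Int → PItem
deriving DecidableEq, Repr

-- the while-loop of A's ')' branch: pop numbers (summing into score); stop at '('; '[' → return 0 (none)
def collapseP : List PItem → Int → Option (Int × List PItem)
  | [], score => some (score, [])
  | PItem.lp :: rest, score => some (score, PItem.lp :: rest)
  | PItem.lb :: _, _ => none
  | PItem.num n :: rest, score => collapseP rest (score + n)

-- the while-loop of A's ']' branch
def collapseB : List PItem → Int → Option (Int × List PItem)
  | [], score => some (score, [])
  | PItem.lb :: rest, score => some (score, PItem.lb :: rest)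
  | PItem.lp :: _, _ => none
  | PItem.num n :: rest, score => collapseB rest (score + n)

-- A's final while-loop: pop everything; a leftover bracket → 0, else sum
def finalA : List PItem → Int → Int
  | [], res => res
  | PItem.num n :: rest, res => finalA rest (res + n)
  | PItem.lp :: _, _ => 0
  | PItem.lb :: _, _ => 0

-- A's main for-loop (stack head = top; early `return 0` is a direct 0)
def loopA : List String → List PItem → Int
  | [], stack => finalA stack 0
  | c :: rest, stack =>
    if c == "(" then loopA rest (PItem.lp :: stack)
    else if c == "[" then loopA rest (PItem.lb :: stack)
    else if c == ")" then
      if stack.isEmpty then 0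
      else
        match collapseP stack 0 with
        | none => 0
        | some (_, []) => 0
        | some (score, _ :: tl) =>
            loopA rest (PItem.num (if score ≠ 0 then 2 * score else 2) :: tl)
    else if c == "]" then
      if stack.isEmpty then 0
      else
        match collapseB stack 0 with
        | none => 0
        | some (_, []) => 0
        | some (score, _ :: tl) =>
            loopA rest (PItem.num (if score ≠ 0 then 3 * score else 3) :: tl)
    else loopA rest stack

def calculate_ps (ps_list : List String) : Int := loopA ps_list []

-- ===== PORT B =====
-- stack[-1][1] = True  (set the inner-value flag of the new top, if any)
def markTop : List (Char × Bool) → List (Char × Bool)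
  | [] => []
  | (c, _) :: tl => (c, true) :: tl

-- B's single for-loop over (ans, temp, stack); stack head = top
def loopB : List String → Int → Int → List (Char × Bool) → Int
  | [], ans, _temp, stack => if stack.isEmpty then ans else 0
  | c :: rest, ans, temp, stack =>
    if c == "(" then loopB rest ans (temp * 2) (('(', false) :: stack)
    else if c == "[" then loopB rest ans (temp * 3) (('[', false) :: stack)
    else if c == ")" then
      match stack with
      | [] => 0
      | (b, flag) :: tl =>
        if b ≠ '(' then 0
        else loopB rest (if flag then ans else ans + temp) (PySem.Int.floordiv temp 2) (markTop tl)
    else if c == "]" then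
      match stack with
      | [] => 0
      | (b, flag) :: tl =>
        if b ≠ '[' then 0
        else loopB rest (if flag then ans else ans + temp) (PySem.Int.floordiv temp 3) (markTop tl)
    else loopB rest ans temp stack

def calculate_ps_alt (ps_list : List String) : Int := loopB ps_list 0 1 []

-- ===== PRECONDITION & SPEC =====
def Spec_calculate_ps (ps_list : List String) (out : Int) : Prop := out = calculate_ps_alt ps_list
instance (ps_list : List String) (out : Int) : Decidable (Spec_calculate_ps ps_list out) := by unfold Spec_calculate_ps; infer_instance

-- ===== CLAIM (what is proved, stated in full; the proofs are below) =====
def Claim_equal_calculate_ps : Prop := ∀ (ps_list : List String), Dom_calculate_ps ps_list → Spec_calculate_ps ps_list (calculate_ps ps_list)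

-- ===== LEMMAS AND PROOFS =====

-- abstraction: B's flag stack from A's stack (b = "a number was seen above, before any open")
def absB : List PItem → Bool → List (Char × Bool)
  | [], _ => []
  | PItem.num _ :: rest, _ => absB rest true
  | PItem.lp :: rest, b => ('(', b) :: absB rest false
  | PItem.lb :: rest, b => ('[', b) :: absB rest false

-- B's running multiplier from A's stack
def prodOf : List PItem → Int
  | [] => 1
  | PItem.num _ :: rest => prodOf rest
  | PItem.lp :: rest => 2 * prodOf rest
  | PItem.lb :: rest => 3 * prodOf rest

-- weighted sum of A's stacked numbers (= B's accumulated ans)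
def sumW : List PItem → Int
  | [] => 0
  | PItem.num n :: rest => n * prodOf rest + sumW rest
  | PItem.lp :: rest => sumW rest
  | PItem.lb :: rest => sumW rest

def goodSt (st : List PItem) : Prop := ∀ n : Int, PItem.num n ∈ st → 0 < n

theorem markTop_absB (st : List PItem) (b : Bool) : markTop (absB st b) = absB st true := by
  induction st generalizing b with
  | nil => rfl
  | cons h t ih =>
    cases h <;> simp [absB, markTop]
    exact ih true

theorem collapseP_shift (st : List PItem) (a : Int) :
    collapseP st a = (collapseP st 0).map (fun p => (p.1 + a, p.2)) := by
  induction st generalizing a with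
  | nil => simp [collapseP]
  | cons h t ih =>
    cases h with
    | lp => simp [collapseP]
    | lb => simp [collapseP]
    | num n =>
      simp only [collapseP]
      rw [ih (a + n), ih (0 + n)]
      cases collapseP t 0 with
      | none => simp
      | some p => simp; ring

theorem collapseB_shift (st : List PItem) (a : Int) :
    collapseB st a = (collapseB st 0).map (fun p => (p.1 + a, p.2)) := by
  induction st generalizing a with
  | nil => simp [collapseB]
  | cons h t ih =>
    cases h with
    | lp => simp [collapseB]
    | lb => simp [collapseB]
    | num n =>
      simp only [collapseB]
      rw [ih (a + n), ih (0 + n)]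
      cases collapseB t 0 with
      | none => simp
      | some p => simp; ring

-- shape lemma for ')' when the innermost open is '('
theorem closeP_ok (st : List PItem) (b f : Bool) (btl : List (Char × Bool))
    (hg : goodSt st) (habs : absB st b = ('(', f) :: btl) :
    ∃ s tl, collapseP st 0 = some (s, PItem.lp :: tl) ∧
      absB tl false = btl ∧ 0 ≤ s ∧ (f = (b || decide (0 < s))) ∧
      prodOf st = 2 * prodOf tl ∧ sumW st = 2 * s * prodOf tl + sumW tl ∧ goodSt tl := by
  induction st generalizing b with
  | nil => simp [absB] at habs
  | cons h t ih =>
    cases h with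
    | lp =>
      simp [absB] at habs
      obtain ⟨hf, hbtl⟩ := habs
      exact ⟨0, t, by simp [collapseP], hbtl, le_refl 0, by simp [hf], by simp [prodOf],
        by simp [sumW], fun n hn => hg n (List.mem_cons_of_mem _ hn)⟩
    | lb => simp [absB] at habs
    | num n =>
      have hn : 0 < n := hg n (List.mem_cons_self)
      have hgt : goodSt t := fun m hm => hg m (List.mem_cons_of_mem _ hm)
      simp only [absB] at habs
      obtain ⟨s, tl, hc, hb2, hs, hf, hp, hw, hgtl⟩ := ih true hgt habs
      refine ⟨s + n, tl, ?_, hb2, by omega, ?_, by simpa [prodOf] using hp, ?_, hgtl⟩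
      · simp only [collapseP]
        rw [collapseP_shift t (0 + n), hc]
        simp
      · simp only [Bool.true_or] at hf; subst hf
        have h0 : (0:Int) < s + n := by omega
        simp [h0]
      · simp only [sumW]
        rw [hw, hp]; ring

theorem closeB_ok (st : List PItem) (b f : Bool) (btl : List (Char × Bool))
    (hg : goodSt st) (habs : absB st b = ('[', f) :: btl) :
    ∃ s tl, collapseB st 0 = some (s, PItem.lb :: tl) ∧
      absB tl false = btl ∧ 0 ≤ s ∧ (f = (b || decide (0 < s))) ∧
      prodOf st = 3 * prodOf tl ∧ sumW st = 3 * s * prodOf tl + sumW tl ∧ goodSt tl := by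
  induction st generalizing b with
  | nil => simp [absB] at habs
  | cons h t ih =>
    cases h with
    | lb =>
      simp [absB] at habs
      obtain ⟨hf, hbtl⟩ := habs
      exact ⟨0, t, by simp [collapseB], hbtl, le_refl 0, by simp [hf], by simp [prodOf],
        by simp [sumW], fun n hn => hg n (List.mem_cons_of_mem _ hn)⟩
    | lp => simp [absB] at habs
    | num n =>
      have hn : 0 < n := hg n (List.mem_cons_self)
      have hgt : goodSt t := fun m hm => hg m (List.mem_cons_of_mem _ hm)
      simp only [absB] at habs
      obtain ⟨s, tl, hc, hb2, hs, hf, hp, hw, hgtl⟩ := ih true hgt habs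
      refine ⟨s + n, tl, ?_, hb2, by omega, ?_, by simpa [prodOf] using hp, ?_, hgtl⟩
      · simp only [collapseB]
        rw [collapseB_shift t (0 + n), hc]
        simp
      · simp only [Bool.true_or] at hf; subst hf
        have h0 : (0:Int) < s + n := by omega
        simp [h0]
      · simp only [sumW]
        rw [hw, hp]; ring

-- when A's stack has no open bracket at all
theorem collapse_none_open (st : List PItem) (b : Bool) (habs : absB st b = []) :
    (∃ s, collapseP st 0 = some (s, [])) ∧ (∃ s, collapseB st 0 = some (s, [])) := by
  induction st generalizing b with
  | nil => exact ⟨⟨0, rfl⟩, ⟨0, rfl⟩⟩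
  | cons h t ih =>
    cases h with
    | lp => simp [absB] at habs
    | lb => simp [absB] at habs
    | num n =>
      simp only [absB] at habs
      obtain ⟨⟨s1, h1⟩, ⟨s2, h2⟩⟩ := ih true habs
      constructor
      · exact ⟨s1 + (0 + n), by simp only [collapseP]; rw [collapseP_shift t (0 + n), h1]; simp⟩
      · exact ⟨s2 + (0 + n), by simp only [collapseB]; rw [collapseB_shift t (0 + n), h2]; simp⟩

-- ')' while-loop hits '[' → A returns 0
theorem closeP_mismatch (st : List PItem) (b f : Bool) (btl : List (Char × Bool))
    (habs : absB st b = ('[', f) :: btl) : collapseP st 0 = none := by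
  induction st generalizing b with
  | nil => simp [absB] at habs
  | cons h t ih =>
    cases h with
    | lp => simp [absB] at habs
    | lb => rfl
    | num n =>
      simp only [absB] at habs
      simp only [collapseP]
      rw [collapseP_shift t (0 + n), ih true habs]
      rfl

theorem closeB_mismatch (st : List PItem) (b f : Bool) (btl : List (Char × Bool))
    (habs : absB st b = ('(', f) :: btl) : collapseB st 0 = none := by
  induction st generalizing b with
  | nil => simp [absB] at habs
  | cons h t ih =>
    cases h with
    | lb => simp [absB] at habs
    | lp => rfl
    | num n =>
      simp only [absB] at habs
      simp only [collapseB]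
      rw [collapseB_shift t (0 + n), ih true habs]
      rfl

-- no open bracket on the stack → absB is [] for either flag
theorem absB_nil_iff (st : List PItem) (b c : Bool) :
    (absB st b = []) ↔ (absB st c = []) := by
  induction st generalizing b c with
  | nil => simp [absB]
  | cons h t ih => cases h <;> simp [absB]

theorem noOpen_prodOf (st : List PItem) (b : Bool) (habs : absB st b = []) :
    prodOf st = 1 := by
  induction st generalizing b with
  | nil => rfl
  | cons h t ih =>
    cases h with
    | lp => simp [absB] at habs
    | lb => simp [absB] at habs
    | num n => simp only [absB] at habs; simpa [prodOf] using ih true habs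

theorem absB_char (st : List PItem) (b : Bool) (c : Char) (f : Bool)
    (t : List (Char × Bool)) (habs : absB st b = (c, f) :: t) : c = '(' ∨ c = '[' := by
  induction st generalizing b with
  | nil => simp [absB] at habs
  | cons h r ih =>
    cases h with
    | lp => simp [absB] at habs; exact Or.inl habs.1.1.symm
    | lb => simp [absB] at habs; exact Or.inr habs.1.1.symm
    | num n => exact ih true habs

-- final loop: no leftover open → weighted sum; otherwise 0
theorem finalA_eq (st : List PItem) (r : Int) :
    finalA st r = if absB st false = [] then r + sumW st else 0 := by
  induction st generalizing r with
  | nil => simp [finalA, sumW, absB]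
  | cons h t ih =>
    cases h with
    | lp => simp [finalA, absB]
    | lb => simp [finalA, absB]
    | num n =>
      simp only [finalA, absB, sumW]
      rw [ih]
      by_cases he : absB t true = []
      · rw [if_pos he, if_pos ((absB_nil_iff t false true).mpr he)]
        rw [noOpen_prodOf t true he]; ring
      · rw [if_neg he, if_neg (fun h => he ((absB_nil_iff t false true).mp h))]

-- main simulation: B's state abstracts A's stack
theorem loop_sim (l : List String) (st : List PItem) (hg : goodSt st) :
    loopA l st = loopB l (sumW st) (prodOf st) (absB st false) := by
  induction l generalizing st with
  | nil =>
    simp only [loopA, loopB, finalA_eq st 0, List.isEmpty_iff]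
    by_cases he : absB st false = [] <;> simp [he]
  | cons c rest ih =>
    simp only [loopA, loopB]
    by_cases h1 : c == "("
    · rw [if_pos h1, if_pos h1]
      have hgood : goodSt (PItem.lp :: st) := by
        intro n hn; exact hg n (by cases List.mem_cons.mp hn with
          | inl h => cases h | inr h => exact h)
      rw [ih _ hgood]
      simp [sumW, prodOf, absB, mul_comm]
    · rw [if_neg h1, if_neg h1]
      by_cases h2 : c == "["
      · rw [if_pos h2, if_pos h2]
        have hgood : goodSt (PItem.lb :: st) := by
          intro n hn; exact hg n (by cases List.mem_cons.mp hn with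
            | inl h => cases h | inr h => exact h)
        rw [ih _ hgood]
        simp [sumW, prodOf, absB, mul_comm]
      · rw [if_neg h2, if_neg h2]
        by_cases h3 : c == ")"
        · rw [if_pos h3, if_pos h3]
          rcases habs : absB st false with _ | ⟨⟨bch, f⟩, btl⟩
          · by_cases hst : st = []
            · subst hst; simp
            · rw [if_neg (by simpa [List.isEmpty_iff] using hst)]
              obtain ⟨⟨s, hcp⟩, -⟩ := collapse_none_open st false habs
              rw [hcp]
          · have hst : st ≠ [] := by intro h; subst h; simp [absB] at habs
            rw [if_neg (by simpa [List.isEmpty_iff] using hst)]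
            by_cases hbch : bch = '('
            · subst hbch
              obtain ⟨s, tl, hcp, hb2, hs, hf, hp, hw, hgtl⟩ :=
                closeP_ok st false f btl hg habs
              rw [hcp]
              simp only [ne_eq, not_true_eq_false, if_false]
              have hX : 0 < (if s ≠ 0 then 2 * s else 2) := by split <;> omega
              have hgood : goodSt (PItem.num (if s ≠ 0 then 2 * s else 2) :: tl) := by
                intro n hn
                cases List.mem_cons.mp hn with
                | inl h => cases h; exact hX
                | inr h => exact hgtl n h
              rw [ih _ hgood]
              have e3 : absB (PItem.num (if s ≠ 0 then 2 * s else 2) :: tl) false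
                  = markTop btl := by
                rw [← hb2, markTop_absB]; rfl
              have e2 : prodOf (PItem.num (if s ≠ 0 then 2 * s else 2) :: tl)
                  = PySem.Int.floordiv (prodOf st) 2 := by
                rw [PySem.Int.floordiv_eq_ediv_of_pos (by norm_num), hp,
                  Int.mul_ediv_cancel_left _ (by norm_num)]
                rfl
              have e1 : sumW (PItem.num (if s ≠ 0 then 2 * s else 2) :: tl)
                  = if f then sumW st else sumW st + prodOf st := by
                simp only [sumW]
                subst hf
                by_cases hsz : s = 0
                · subst hsz; simp [hw, hp]; ring
                · have h0 : 0 < s := by omega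
                  simp only [ne_eq, hsz, not_false_eq_true, if_true, h0, decide_true,
                    Bool.false_or, hw, hp]
              rw [e1, e2, e3]
            · have : bch = '[' := by
                rcases absB_char st false bch f btl habs with h | h
                · exact absurd h hbch
                · exact h
              subst this
              rw [closeP_mismatch st false f btl habs]
              simp
        · rw [if_neg h3, if_neg h3]
          by_cases h4 : c == "]"
          · rw [if_pos h4, if_pos h4]
            rcases habs : absB st false with _ | ⟨⟨bch, f⟩, btl⟩
            · by_cases hst : st = []
              · subst hst; simp
              · rw [if_neg (by simpa [List.isEmpty_iff] using hst)]
                obtain ⟨-, ⟨s, hcp⟩⟩ := collapse_none_open st false habs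
                rw [hcp]
            · have hst : st ≠ [] := by intro h; subst h; simp [absB] at habs
              rw [if_neg (by simpa [List.isEmpty_iff] using hst)]
              by_cases hbch : bch = '['
              · subst hbch
                obtain ⟨s, tl, hcp, hb2, hs, hf, hp, hw, hgtl⟩ :=
                  closeB_ok st false f btl hg habs
                rw [hcp]
                simp only [ne_eq, not_true_eq_false, if_false]
                have hX : 0 < (if s ≠ 0 then 3 * s else 3) := by split <;> omega
                have hgood : goodSt (PItem.num (if s ≠ 0 then 3 * s else 3) :: tl) := by
                  intro n hn
                  cases List.mem_cons.mp hn with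
                  | inl h => cases h; exact hX
                  | inr h => exact hgtl n h
                rw [ih _ hgood]
                have e3 : absB (PItem.num (if s ≠ 0 then 3 * s else 3) :: tl) false
                    = markTop btl := by
                  rw [← hb2, markTop_absB]; rfl
                have e2 : prodOf (PItem.num (if s ≠ 0 then 3 * s else 3) :: tl)
                    = PySem.Int.floordiv (prodOf st) 3 := by
                  rw [PySem.Int.floordiv_eq_ediv_of_pos (by norm_num), hp,
                    Int.mul_ediv_cancel_left _ (by norm_num)]
                  rfl
                have e1 : sumW (PItem.num (if s ≠ 0 then 3 * s else 3) :: tl)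
                    = if f then sumW st else sumW st + prodOf st := by
                  simp only [sumW]
                  subst hf
                  by_cases hsz : s = 0
                  · subst hsz; simp [hw, hp]; ring
                  · have h0 : 0 < s := by omega
                    simp only [ne_eq, hsz, not_false_eq_true, if_true, h0, decide_true,
                      Bool.false_or, hw, hp]
                rw [e1, e2, e3]
              · have : bch = '(' := by
                  rcases absB_char st false bch f btl habs with h | h
                  · exact h
                  · exact absurd h hbch
                subst this
                rw [closeB_mismatch st false f btl habs]
                simp
          · rw [if_neg h4, if_neg h4]
            exact ih st hg

theorem calculate_ps_spec : Claim_equal_calculate_ps := by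
  intro ps _
  unfold Spec_calculate_ps calculate_ps calculate_ps_alt
  have := loop_sim ps [] (by intro n hn; simp at hn)
  simpa [sumW, prodOf, absB] using this
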